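-- pv_equiv track=rewrite | github.com/anugoen4/AOC_2021 | Day_10_Syntax_Scoring/python_part_2.py | find_illegal
-- ===== SOURCE A (Python) =====
-- def find_illegal(exp):
--     stack = []
--     for e in exp:
--         if e in ['(','{', '[', '<']:
--             stack.append(e)
--         elif e == ')':
--             if(len(stack) == 0):
--                 return True
--             if(stack[len(stack) - 1] != '('):
--                 return True
--             stack = stack[:-1]
--         elif e == '}':
--             if(len(stack) == 0):
--                 return True
--             if(stack[len(stack) - 1] != '{'):
--                 return True
--             stack = stack[:-1]
--         elif e == ']':
--             if(len(stack) == 0):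
--                 return True
--             if(stack[len(stack) - 1] != '['):
--                 return True
--             stack = stack[:-1]
--         elif e == '>':
--             if(len(stack) == 0):
--                 return True
--             if(stack[len(stack) - 1] != '<'):
--                 return True
--             stack = stack[:-1]
--     return False
-- ===== SOURCE B (Python) =====
-- def _reduce(s):
--     """One pass: drop every innermost adjacent matched pair."""
--     t = []
--     i = 0
--     while i < len(s):
--         if i + 1 < len(s) and s[i] + s[i + 1] in ('()', '[]', '{}', '<>'):
--             i += 2
--         else:
--             t.append(s[i])
--             i += 1
--     return t
--
--
-- def find_illegal(exp):
--     s = [c for c in exp if c in '([{<)]}>']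
--     t = _reduce(s)
--     while t != s:
--         s = t
--         t = _reduce(s)
--     return any(c in ')]}>' for c in s)
-- ===== Notes on version B (the rewrite author's own statement) =====
-- stated objective: alternative
-- what changed: Replaces the one-pass explicit-stack scan by iterated cancellation of adjacent matched bracket pairs to a fixpoint, then reports corruption iff a closing bracket survives.
import Mathlib
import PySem

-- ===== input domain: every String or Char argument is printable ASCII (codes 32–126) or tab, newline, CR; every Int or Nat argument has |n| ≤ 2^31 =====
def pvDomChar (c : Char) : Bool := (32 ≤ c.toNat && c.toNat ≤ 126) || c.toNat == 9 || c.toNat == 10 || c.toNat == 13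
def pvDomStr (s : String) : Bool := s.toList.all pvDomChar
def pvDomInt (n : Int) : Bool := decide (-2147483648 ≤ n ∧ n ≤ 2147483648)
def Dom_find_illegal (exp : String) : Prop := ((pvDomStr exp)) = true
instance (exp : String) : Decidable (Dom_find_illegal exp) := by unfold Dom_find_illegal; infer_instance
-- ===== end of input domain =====

-- B replaces A's one-pass explicit-stack scan by iterated cancellation of adjacent
-- matched bracket pairs to a fixpoint (corrupt iff a closer survives); objective: alternative.


-- ===== PORT A =====
-- the loop of A: stack of openers; early return True modelled by returning true from the recursion
def goA (stack : List Char) : List Char → Bool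
  | [] => false
  | e :: rest =>
    if e = '(' ∨ e = '{' ∨ e = '[' ∨ e = '<' then
      goA (stack ++ [e]) rest
    else if e = ')' then
      if stack.length = 0 then true
      else if stack.getLast? ≠ some '(' then true
      else goA stack.dropLast rest
    else if e = '}' then
      if stack.length = 0 then true
      else if stack.getLast? ≠ some '{' then true
      else goA stack.dropLast rest
    else if e = ']' then
      if stack.length = 0 then true
      else if stack.getLast? ≠ some '[' then true
      else goA stack.dropLast rest
    else if e = '>' then
      if stack.length = 0 then true
      else if stack.getLast? ≠ some '<' then true
      else goA stack.dropLast rest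
    else goA stack rest

def find_illegal (exp : String) : Bool := goA [] exp.toList

-- ===== PORT B =====
-- s[i] + s[i+1] in ('()','[]','{}','<>')
def matchedB (x y : Char) : Bool :=
  (x = '(' ∧ y = ')') ∨ (x = '[' ∧ y = ']') ∨ (x = '{' ∧ y = '}') ∨ (x = '<' ∧ y = '>')

-- _reduce: one left-to-right pass dropping every innermost adjacent matched pair
def reduceB : List Char → List Char
  | [] => []
  | [x] => [x]
  | x :: y :: rest => if matchedB x y then reduceB rest else x :: reduceB (y :: rest)

theorem reduceB_length_le (s : List Char) : (reduceB s).length ≤ s.length := by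
  fun_induction reduceB with
  | case1 => simp
  | case2 x => simp
  | case3 x y rest hm ih => simp; omega
  | case4 x y rest hm ih => simp at ih ⊢; omega

theorem reduceB_lt_of_ne (s : List Char) (h : reduceB s ≠ s) :
    (reduceB s).length < s.length := by
  fun_induction reduceB with
  | case1 => simp at h
  | case2 => simp at h
  | case3 x y rest hm ih =>
    have := reduceB_length_le rest; simp; omega
  | case4 x y rest hm ih =>
    have h2 : reduceB (y :: rest) ≠ y :: rest := by
      intro he; exact h (by simp [he])
    have := ih h2; simp at this ⊢; omega

-- the 'while t != s' loop
def loopB (s : List Char) : List Char :=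
  if reduceB s = s then s else loopB (reduceB s)
termination_by s.length
decreasing_by exact reduceB_lt_of_ne s (by assumption)

def find_illegal_alt (exp : String) : Bool :=
  let s := exp.toList.filter (fun c => c ∈ "([{<)]}>".toList)
  let r := loopB s
  r.any (fun c => c ∈ ")]}>".toList)

-- ===== PRECONDITION & SPEC =====
def Spec_find_illegal (exp : String) (out : Bool) : Prop := out = find_illegal_alt exp
instance (exp : String) (out : Bool) : Decidable (Spec_find_illegal exp out) := by unfold Spec_find_illegal; infer_instance

-- ===== CLAIM (what is proved, stated in full; the proofs are below) =====
def Claim_equal_find_illegal : Prop := ∀ (exp : String), Dom_find_illegal exp → Spec_find_illegal exp (find_illegal exp)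

-- ===== LEMMAS AND PROOFS =====

-- literal bracket lists (proof-only)
theorem brackets_toList : "([{<)]}>".toList = ['(', '[', '{', '<', ')', ']', '}', '>'] := rfl

def opOf (c : Char) : Char :=
  if c = ')' then '(' else if c = '}' then '{' else if c = ']' then '[' else '<'

theorem goA_open (st : List Char) (e : Char) (rest : List Char)
    (h : e = '(' ∨ e = '{' ∨ e = '[' ∨ e = '<') :
    goA st (e :: rest) = goA (st ++ [e]) rest := by
  simp [goA, h]

theorem goA_close (st : List Char) (e : Char) (rest : List Char)
    (h : e = ')' ∨ e = '}' ∨ e = ']' ∨ e = '>') :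
    goA st (e :: rest) =
      if st = [] then true
      else if st.getLast? ≠ some (opOf e) then true
      else goA st.dropLast rest := by
  rcases h with rfl | rfl | rfl | rfl <;>
    simp [goA, opOf, List.length_eq_zero_iff]

theorem goA_skip (st : List Char) (e : Char) (rest : List Char)
    (h1 : ¬(e = '(' ∨ e = '{' ∨ e = '[' ∨ e = '<'))
    (h2 : ¬(e = ')' ∨ e = '}' ∨ e = ']' ∨ e = '>')) :
    goA st (e :: rest) = goA st rest := by
  have h2' : e ≠ ')' ∧ e ≠ '}' ∧ e ≠ ']' ∧ e ≠ '>' := by tauto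
  simp [goA, h1, h2'.1, h2'.2.1, h2'.2.2.1, h2'.2.2.2]

theorem goA_filter (l : List Char) :
    ∀ st, goA st (l.filter (fun c => c ∈ "([{<)]}>".toList)) = goA st l := by
  induction l with
  | nil => intro st; rfl
  | cons e t ih =>
    intro st
    by_cases hb : e ∈ "([{<)]}>".toList
    · rw [List.filter_cons_of_pos (by simpa using hb)]
      rw [brackets_toList] at hb
      rcases (by simpa using hb : e = '(' ∨ e = '[' ∨ e = '{' ∨ e = '<' ∨
          e = ')' ∨ e = ']' ∨ e = '}' ∨ e = '>') with
        rfl | rfl | rfl | rfl | rfl | rfl | rfl | rfl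
      · rw [goA_open _ _ _ (by simp), goA_open _ _ _ (by simp)]; exact ih _
      · rw [goA_open _ _ _ (by simp), goA_open _ _ _ (by simp)]; exact ih _
      · rw [goA_open _ _ _ (by simp), goA_open _ _ _ (by simp)]; exact ih _
      · rw [goA_open _ _ _ (by simp), goA_open _ _ _ (by simp)]; exact ih _
      · rw [goA_close _ _ _ (by simp), goA_close _ _ _ (by simp)]
        split_ifs <;> first | rfl | exact ih _
      · rw [goA_close _ _ _ (by simp), goA_close _ _ _ (by simp)]
        split_ifs <;> first | rfl | exact ih _
      · rw [goA_close _ _ _ (by simp), goA_close _ _ _ (by simp)]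
        split_ifs <;> first | rfl | exact ih _
      · rw [goA_close _ _ _ (by simp), goA_close _ _ _ (by simp)]
        split_ifs <;> first | rfl | exact ih _
    · rw [List.filter_cons_of_neg (by simpa using hb)]
      rw [brackets_toList] at hb
      have hb' : ¬(e = '(' ∨ e = '[' ∨ e = '{' ∨ e = '<' ∨
          e = ')' ∨ e = ']' ∨ e = '}' ∨ e = '>') := by simpa using hb
      rw [goA_skip _ _ _ (by tauto) (by tauto)]
      exact ih _

theorem goA_pairdel (o c : Char) (hm : matchedB o c = true) :
    ∀ (u st v : List Char), goA st (u ++ o :: c :: v) = goA st (u ++ v) := by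
  intro u
  induction u with
  | nil =>
    intro st v
    rcases (by simpa [matchedB] using hm :
        (o = '(' ∧ c = ')') ∨ (o = '[' ∧ c = ']') ∨
        (o = '{' ∧ c = '}') ∨ (o = '<' ∧ c = '>')) with
      ⟨rfl, rfl⟩ | ⟨rfl, rfl⟩ | ⟨rfl, rfl⟩ | ⟨rfl, rfl⟩ <;>
      simp [goA]
  | cons e u' ih =>
    intro st v
    by_cases h1 : e = '(' ∨ e = '{' ∨ e = '[' ∨ e = '<'
    · rw [List.cons_append, List.cons_append, goA_open _ _ _ h1, goA_open _ _ _ h1]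
      exact ih _ _
    · by_cases h2 : e = ')' ∨ e = '}' ∨ e = ']' ∨ e = '>'
      · rw [List.cons_append, List.cons_append, goA_close _ _ _ h2, goA_close _ _ _ h2]
        split_ifs <;> first | rfl | exact ih _ _
      · rw [List.cons_append, List.cons_append, goA_skip _ _ _ h1 h2, goA_skip _ _ _ h1 h2]
        exact ih _ _

theorem goA_reduce (v : List Char) : ∀ u st, goA st (u ++ reduceB v) = goA st (u ++ v) := by
  fun_induction reduceB v with
  | case1 => intro u st; rfl
  | case2 x => intro u st; rfl
  | case3 x y rest hm ih =>
    intro u st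
    rw [ih u st]
    exact (goA_pairdel x y hm u st rest).symm
  | case4 x y rest hm ih =>
    intro u st
    rw [List.append_cons u x (reduceB (y :: rest)), ih (u ++ [x]) st,
      List.append_cons u x (y :: rest)]

theorem goA_loop (s : List Char) : ∀ st, goA st (loopB s) = goA st s := by
  fun_induction loopB s with
  | case1 s h => intro st; rfl
  | case2 s h ih =>
    intro st
    rw [ih st]
    have h0 := goA_reduce s [] st
    simpa using h0

theorem loopB_fix (s : List Char) : reduceB (loopB s) = loopB s := by
  fun_induction loopB s with
  | case1 s h => exact h
  | case2 s h ih => exact ih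

theorem reduceB_occ_lt (s : List Char) :
    ∀ u o c v, matchedB o c = true → s = u ++ o :: c :: v →
      (reduceB s).length < s.length := by
  fun_induction reduceB s with
  | case1 => intro u o c v hm he; cases u <;> simp_all
  | case2 x => intro u o c v hm he; cases u <;> simp_all
  | case3 x y rest hm' ih =>
    intro u o c v hm he
    have := reduceB_length_le rest
    simp; omega
  | case4 x y rest hm' ih =>
    intro u o c v hm he
    cases u with
    | nil =>
      obtain ⟨rfl, rfl, rfl⟩ : x = o ∧ y = c ∧ rest = v := by simpa using he
      exact absurd hm hm'
    | cons a u' =>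
      obtain ⟨rfl, ht⟩ : x = a ∧ y :: rest = u' ++ o :: c :: v := by simpa using he
      have := ih u' o c v hm ht
      simp at this ⊢
      omega

theorem mk_matched (o c : Char)
    (ho : o = '(' ∨ o = '{' ∨ o = '[' ∨ o = '<')
    (hc : c = ')' ∨ c = '}' ∨ c = ']' ∨ c = '>')
    (he : o = opOf c) : matchedB o c = true := by
  rcases ho with rfl | rfl | rfl | rfl <;> rcases hc with rfl | rfl | rfl | rfl <;>
    simp_all [opOf, matchedB]

theorem goA_openers (w : List Char)
    (hw : ∀ e ∈ w, e = '(' ∨ e = '{' ∨ e = '[' ∨ e = '<') :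
    ∀ st rest, goA st (w ++ rest) = goA (st ++ w) rest := by
  induction w with
  | nil => intro st rest; simp
  | cons e w' ih =>
    intro st rest
    rw [List.cons_append, goA_open _ _ _ (hw e (by simp))]
    rw [ih (fun x hx => hw x (by simp [hx])) (st ++ [e]) rest]
    simp

theorem reduceB_mem (s : List Char) : ∀ e ∈ reduceB s, e ∈ s := by
  fun_induction reduceB s with
  | case1 => simp
  | case2 x => simp
  | case3 x y rest hm ih => intro e he; simpa using Or.inr (Or.inr (ih e he))
  | case4 x y rest hm ih =>
    intro e he
    rcases (by simpa using he : e = x ∨ e ∈ reduceB (y :: rest)) with rfl | h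
    · simp
    · simpa using Or.inr (by simpa using ih e h)

theorem loopB_mem (s : List Char) : ∀ e ∈ loopB s, e ∈ s := by
  fun_induction loopB s with
  | case1 s h => intro e he; exact he
  | case2 s h ih => intro e he; exact reduceB_mem s e (ih e he)

theorem dropWhile_head_false {α : Type} {p : α → Bool} :
    ∀ (l : List α) (c : α) (v : List α), l.dropWhile p = c :: v → p c = false := by
  intro l
  induction l with
  | nil => intro c v h; simp at h
  | cons a t ih =>
    intro c v h
    by_cases hp : p a
    · rw [List.dropWhile_cons_of_pos hp] at h
      exact ih c v h
    · rw [List.dropWhile_cons_of_neg hp] at h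
      obtain ⟨rfl, -⟩ : a = c ∧ t = v := by simpa using h
      simpa using hp

theorem fix_char (s : List Char)
    (hb : ∀ e ∈ s, e ∈ "([{<)]}>".toList)
    (hf : reduceB s = s) :
    goA [] s = s.any (fun c => c ∈ ")]}>".toList) := by
  have hcls : ∀ e ∈ s, (e = '(' ∨ e = '{' ∨ e = '[' ∨ e = '<') ∨
      (e = ')' ∨ e = '}' ∨ e = ']' ∨ e = '>') := by
    intro e he
    have h8 := hb e he
    rw [brackets_toList] at h8
    rcases (by simpa using h8 : e = '(' ∨ e = '[' ∨ e = '{' ∨ e = '<' ∨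
        e = ')' ∨ e = ']' ∨ e = '}' ∨ e = '>') with
      rfl | rfl | rfl | rfl | rfl | rfl | rfl | rfl <;> tauto
  cases hd : s.dropWhile (fun e => decide (e = '(' ∨ e = '{' ∨ e = '[' ∨ e = '<')) with
  | nil =>
    have hall : ∀ e ∈ s, e = '(' ∨ e = '{' ∨ e = '[' ∨ e = '<' := by
      have h0 := List.dropWhile_eq_nil_iff.mp hd
      intro e he
      simpa using h0 e he
    have h1 : goA [] s = false := by
      have h := goA_openers s hall [] []
      simpa [goA] using h
    have h2 : s.any (fun c => c ∈ ")]}>".toList) = false := by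
      simp only [List.any_eq_false]
      intro e he
      rcases hall e he with rfl | rfl | rfl | rfl <;> decide
    rw [h1, h2]
  | cons c v =>
    have htw0 : List.takeWhile (fun e => decide (e = '(' ∨ e = '{' ∨ e = '[' ∨ e = '<')) s
        ++ c :: v = s := by
      conv_rhs => rw [← List.takeWhile_append_dropWhile
        (p := fun e => decide (e = '(' ∨ e = '{' ∨ e = '[' ∨ e = '<')) (l := s)]
      rw [hd]
    have halltw0 : ∀ e ∈ List.takeWhile
        (fun e => decide (e = '(' ∨ e = '{' ∨ e = '[' ∨ e = '<')) s,
        e = '(' ∨ e = '{' ∨ e = '[' ∨ e = '<' := by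
      intro e he
      simpa using List.mem_takeWhile_imp he
    obtain ⟨tw, htw, halltw⟩ : ∃ tw, tw ++ c :: v = s ∧
        ∀ e ∈ tw, e = '(' ∨ e = '{' ∨ e = '[' ∨ e = '<' := ⟨_, htw0, halltw0⟩
    have hcnop : ¬(c = '(' ∨ c = '{' ∨ c = '[' ∨ c = '<') := by
      have h0 := dropWhile_head_false s c v hd
      simpa using h0
    have hcmem : c ∈ s := by rw [← htw]; simp
    have hccl : c = ')' ∨ c = '}' ∨ c = ']' ∨ c = '>' := (hcls c hcmem).resolve_left hcnop
    have hany : s.any (fun c => c ∈ ")]}>".toList) = true := by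
      simp only [List.any_eq_true]
      exact ⟨c, hcmem, by rcases hccl with rfl | rfl | rfl | rfl <;> decide⟩
    have hgo : goA [] s = goA tw (c :: v) := by
      rw [← htw]
      have h := goA_openers tw halltw [] (c :: v)
      simpa using h
    rw [hgo, hany, goA_close _ _ _ hccl]
    rcases List.eq_nil_or_concat tw with rfl | ⟨w', o, rfl⟩
    · simp
    · have ho := halltw o (by simp)
      have hne : o ≠ opOf c := by
        intro he
        have hm := mk_matched o c ho hccl he
        have hocc : s = w' ++ o :: c :: v := by rw [← htw]; simp
        have hlt := reduceB_occ_lt s w' o c v hm hocc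
        rw [hf] at hlt
        omega
      simp [hne]

-- ===== VERDICT (by name: the statement is the Claim_ definition above) =====
theorem find_illegal_spec : Claim_equal_find_illegal := by
  intro exp _
  unfold Spec_find_illegal find_illegal find_illegal_alt
  have h1 := (goA_filter exp.toList []).symm
  have h2 := (goA_loop (exp.toList.filter (fun c => c ∈ "([{<)]}>".toList)) []).symm
  have hbk : ∀ e ∈ loopB (exp.toList.filter (fun c => c ∈ "([{<)]}>".toList)),
      e ∈ "([{<)]}>".toList := by
    intro e he
    have hm := loopB_mem _ e he
    simpa using (List.mem_filter.mp hm).2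
  have h3 := fix_char _ hbk (loopB_fix _)
  show goA [] exp.toList =
    (loopB (exp.toList.filter (fun c => c ∈ "([{<)]}>".toList))).any
      (fun c => c ∈ ")]}>".toList)
  rw [h1, h2, h3]
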